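-- pv_equiv track=rewrite | github.com/mathunjoroge/hospital | departments/nlp/kenyalaw_scraper.py | extract_preamble
-- ===== SOURCE A (Python) =====
-- def extract_preamble(content: str) -> str:
--     """Extract preamble from constitution content"""
--     if not isinstance(content, str):
--         return "Preamble content not found"
--
--     lines = content.split('\n')
--     preamble_lines = []
--     in_preamble = False
--
--     for line in lines:
--         line = line.strip()
--         if 'preamble' in line.lower() or 'we the people' in line.lower():
--             in_preamble = True
--         if in_preamble and line and not line.lower().startswith('chapter'):
--             preamble_lines.append(line)
--         elif in_preamble and line.lower().startswith('chapter'):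
--             break
--
--     return ' '.join(preamble_lines) if preamble_lines else "Preamble content not found"
-- ===== SOURCE B (Python) =====
-- def extract_preamble(content: str) -> str:
--     """Extract preamble from constitution content"""
--     if not isinstance(content, str):
--         return "Preamble content not found"
--     lines = [ln.strip() for ln in content.split('\n')]
--     start = next((i for i, ln in enumerate(lines)
--                   if 'preamble' in ln.lower() or 'we the people' in ln.lower()), None)
--     if start is None:
--         return "Preamble content not found"
--     tail = lines[start:]
--     stop = next((j for j, ln in enumerate(tail)
--                  if ln.lower().startswith('chapter')), None)
--     seg = tail if stop is None else tail[:stop]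
--     kept = [ln for ln in seg if ln]
--     return ' '.join(kept) if kept else "Preamble content not found"
-- ===== Notes on version B (the rewrite author's own statement) =====
-- stated objective: simpler
-- what changed: Replaces A's single flag-driven state machine (in_preamble flag + break inside one loop) by a find-start-index / find-stop-index / slice / filter decomposition over the pre-stripped lines.
import Mathlib
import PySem

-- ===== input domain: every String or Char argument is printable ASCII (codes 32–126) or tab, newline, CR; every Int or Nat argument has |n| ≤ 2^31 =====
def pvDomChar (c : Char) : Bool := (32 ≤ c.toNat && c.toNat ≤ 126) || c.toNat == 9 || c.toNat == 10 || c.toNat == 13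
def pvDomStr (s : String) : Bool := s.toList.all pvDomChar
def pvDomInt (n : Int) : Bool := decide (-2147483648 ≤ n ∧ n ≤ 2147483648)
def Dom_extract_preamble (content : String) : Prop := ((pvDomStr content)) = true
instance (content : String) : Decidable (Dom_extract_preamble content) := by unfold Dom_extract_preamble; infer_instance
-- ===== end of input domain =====

-- B replaces A's flag-driven single-pass state machine by a find-start / find-stop / slice / filter decomposition (objective: simpler).

-- shared predicates (both Pythons test these exact conditions on a stripped line)
def pvTrig (l : String) : Bool :=
  PySem.Str.isIn "preamble" (PySem.Str.lower l) || PySem.Str.isIn "we the people" (PySem.Str.lower l)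

def pvChap (l : String) : Bool :=
  PySem.Str.startswith (PySem.Str.lower l) "chapter"

-- ===== PORT A =====
-- loop state: (preamble_lines, in_preamble, broken); 'broken' models Python's break
def pvStepA (st : List String × Bool × Bool) (line : String) : List String × Bool × Bool :=
  if st.2.2 then st
  else
    let l := PySem.Str.strip line
    let inP := st.2.1 || pvTrig l
    if inP && !(l == "") && !pvChap l then (st.1 ++ [l], inP, false)
    else if inP && pvChap l then (st.1, inP, true)
    else (st.1, inP, false)

def extract_preamble (content : String) : String :=
  let lines := (PySem.Str.split? content "\n").getD []
  let r := lines.foldl pvStepA ([], false, false)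
  if r.1 == [] then "Preamble content not found" else PySem.Str.join " " r.1

-- ===== PORT B =====
def extract_preamble_alt (content : String) : String :=
  let lines := ((PySem.Str.split? content "\n").getD []).map PySem.Str.strip
  match lines.findIdx? pvTrig with
  | none => "Preamble content not found"
  | some i =>
    let tail := lines.drop i
    let seg := match tail.findIdx? pvChap with
               | none => tail
               | some j => tail.take j
    let kept := seg.filter (fun l => !(l == ""))
    if kept == [] then "Preamble content not found" else PySem.Str.join " " kept

-- ===== PRECONDITION & SPEC =====
def Spec_extract_preamble (content : String) (out : String) : Prop := out = extract_preamble_alt content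
instance (content : String) (out : String) : Decidable (Spec_extract_preamble content out) := by unfold Spec_extract_preamble; infer_instance

-- ===== CLAIM (what is proved, stated in full; the proofs are below) =====
def Claim_equal_extract_preamble : Prop := ∀ (content : String), Dom_extract_preamble content → Spec_extract_preamble content (extract_preamble content)

-- ===== LEMMAS AND PROOFS =====

-- once broken, the fold is constant
theorem pvFold_broken (ls : List String) (acc : List String) (p : Bool) :
    ls.foldl pvStepA (acc, p, true) = (acc, p, true) := by
  induction ls with
  | nil => rfl
  | cons l rest ih => simpa [pvStepA] using ih

-- once in_preamble, the fold collects the non-empty stripped lines up to the first 'chapter' line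
theorem pvFold_in (ls : List String) (acc : List String) :
    (ls.foldl pvStepA (acc, true, false)).1 =
      acc ++ ((match (ls.map PySem.Str.strip).findIdx? pvChap with
               | none => ls.map PySem.Str.strip
               | some j => (ls.map PySem.Str.strip).take j).filter (fun l => !(l == ""))) := by
  induction ls generalizing acc with
  | nil => simp
  | cons l rest ih =>
    by_cases hc : pvChap (PySem.Str.strip l)
    · simp [pvStepA, hc, pvFold_broken, List.findIdx?_cons]
    · by_cases he : PySem.Str.strip l = ""
      · have hstep : pvStepA (acc, true, false) l = (acc, true, false) := by
          simp [pvStepA, he, show pvChap "" = false from by decide]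
        simp only [List.foldl_cons, hstep]
        rw [ih]
        simp only [List.map_cons, List.findIdx?_cons, hc]
        cases h : (rest.map PySem.Str.strip).findIdx? pvChap <;> simp [h, he]
      · have hstep : pvStepA (acc, true, false) l = (acc ++ [PySem.Str.strip l], true, false) := by
          simp [pvStepA, hc, he]
        simp only [List.foldl_cons, hstep]
        rw [ih]
        simp only [List.map_cons, List.findIdx?_cons, hc]
        cases h : (rest.map PySem.Str.strip).findIdx? pvChap <;> simp [h, he]

-- before the trigger, the fold is A's whole loop on the suffix from the first trigger line
theorem pvFold_out (ls : List String) :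
    (ls.foldl pvStepA ([], false, false)).1 =
      (match (ls.map PySem.Str.strip).findIdx? pvTrig with
       | none => []
       | some i =>
         (match ((ls.map PySem.Str.strip).drop i).findIdx? pvChap with
          | none => (ls.map PySem.Str.strip).drop i
          | some j => ((ls.map PySem.Str.strip).drop i).take j).filter (fun l => !(l == ""))) := by
  induction ls with
  | nil => simp
  | cons l rest ih =>
    by_cases ht : pvTrig (PySem.Str.strip l)
    · have hstep : pvStepA ([], false, false) l = pvStepA ([], true, false) l := by
        simp [pvStepA, ht]
      have := pvFold_in (l :: rest) []
      simp only [List.foldl_cons, hstep] at this ⊢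
      rw [this]
      simp [List.findIdx?_cons, ht]
    · have hstep : pvStepA ([], false, false) l = ([], false, false) := by
        simp [pvStepA, ht]
      simp only [List.foldl_cons, hstep]
      rw [ih]
      simp only [List.map_cons, List.findIdx?_cons, ht]
      cases h : (rest.map PySem.Str.strip).findIdx? pvTrig <;> simp [h]

-- ===== VERDICT (by name: the statement is the Claim_ definition above) =====
theorem extract_preamble_spec : Claim_equal_extract_preamble := by
  intro content _
  unfold Spec_extract_preamble extract_preamble extract_preamble_alt
  have := pvFold_out ((PySem.Str.split? content "\n").getD [])
  simp only [this]
  cases h : (((PySem.Str.split? content "\n").getD []).map PySem.Str.strip).findIdx? pvTrig with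
  | none => simp
  | some i =>
    cases h2 : ((((PySem.Str.split? content "\n").getD []).map PySem.Str.strip).drop i).findIdx? pvChap <;>
      simp [h2]
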